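-- pv_equiv track=rewrite | github.com/CharlotteMontanari/Licence-informatique | Licence2/I43/TP3.py | mat_to_list
-- ===== SOURCE A (Python) =====
-- def mat_to_list(L):
--     liste = []
--     i = 0
--     while i < len(L):
--         j = len(L)-1
--         somme = 1
--         while L[i][j] != 1 and j > 0:
--             j -= 1
--             somme = somme << 8
--         liste += [somme]
--         i += 1
--     return liste
-- ===== SOURCE B (Python) =====
-- def mat_to_list(L):
--     n = len(L)
--     return [min([1 << 8 * (n - 1 - j) for j in range(n) if row[j] == 1]
--                 + [1 << 8 * (n - 1)])
--             for row in L]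
-- ===== Notes on version B (the rewrite author's own statement) =====
-- stated objective: alternative
-- what changed: B drops A's positional search entirely: instead of locating the rightmost 1 by a backward while-loop that shifts an accumulator, B generates the candidate code 256^(n-1-j) for every column j holding a 1 and takes the minimum of these candidates together with the default 256^(n-1).
import Mathlib
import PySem

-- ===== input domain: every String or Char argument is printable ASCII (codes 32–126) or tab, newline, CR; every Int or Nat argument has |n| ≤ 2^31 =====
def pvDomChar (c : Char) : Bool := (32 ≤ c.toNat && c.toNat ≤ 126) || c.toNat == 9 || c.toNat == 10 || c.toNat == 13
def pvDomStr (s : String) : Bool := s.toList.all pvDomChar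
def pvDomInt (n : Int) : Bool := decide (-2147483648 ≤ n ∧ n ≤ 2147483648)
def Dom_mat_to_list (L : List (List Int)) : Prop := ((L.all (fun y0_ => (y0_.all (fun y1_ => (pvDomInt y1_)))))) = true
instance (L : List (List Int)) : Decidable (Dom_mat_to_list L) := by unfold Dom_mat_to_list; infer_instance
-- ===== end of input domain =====

-- B drops A's positional search: instead of locating the rightmost 1 by a backward scan that
-- shifts an accumulator, it generates a candidate code 256^(n-1-j) for every column holding a 1
-- and takes the minimum of the candidates plus a default (objective: alternative, same cost).

-- ===== PORT A =====
-- inner while loop of A: while L[i][j] != 1 and j > 0: j -= 1; somme <<= 8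
-- (out-of-range indexing, which raises IndexError in Python, is excluded by Pre_; the port reads 0 there)
def matALoop (row : List Int) (j : Nat) (somme : Int) : Int :=
  if h : (PySem.List.pyGet? row (j : Int)).getD 0 ≠ 1 ∧ 0 < j then
    matALoop row (j - 1) (somme <<< (8 : Nat))
  else somme
termination_by j
decreasing_by omega

def mat_to_list (L : List (List Int)) : List Int :=
  L.foldl (fun liste row => liste ++ [matALoop row (L.length - 1) 1]) []

-- ===== PORT B =====
-- the comprehension [1 << 8*(n-1-j) for j in range(n) if row[j] == 1] is filter + map over range(n);
-- row[j] out of range (Python IndexError) is excluded by Pre_ (the port reads 0 there);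
-- for j in range(n) the Python shift amount 8*(n-1-j) is ≥ 0, so .toNat is exact;
-- the candidate list ends with the default [1 << 8*(n-1)], hence is non-empty and min() cannot
-- raise: min? is some there and .getD 0 is a safe unwrap.
def mat_to_list_alt (L : List (List Int)) : List Int :=
  let n := L.length
  L.map (fun row =>
    (PySem.List.min?
      ((((PySem.List.pyRange 0 (n : Int) 1).filter
           (fun j => (PySem.List.pyGet? row j).getD 0 == 1)).map
          (fun j => (1 : Int) <<< (8 * ((n : Int) - 1 - j)).toNat))
        ++ [(1 : Int) <<< (8 * (n - 1))])
      (fun y => y)).getD 0)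

-- ===== PRECONDITION & SPEC =====
-- Pre_ excludes exactly the ragged inputs (some row shorter than the number of rows) on which
-- A raises IndexError.
def Pre_mat_to_list (L : List (List Int)) : Prop := ∀ row ∈ L, L.length ≤ row.length
instance (L : List (List Int)) : Decidable (Pre_mat_to_list L) := by unfold Pre_mat_to_list; infer_instance
def pvWitness_mat_to_list : List (List Int) := [[0, 1], [1, 0]]

def Spec_mat_to_list (L : List (List Int)) (out : List Int) : Prop := out = mat_to_list_alt L
instance (L : List (List Int)) (out : List Int) : Decidable (Spec_mat_to_list L out) := by unfold Spec_mat_to_list; infer_instance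

-- ===== CLAIM (what is proved, stated in full; the proofs are below) =====
def Claim_equal_mat_to_list : Prop := ∀ (L : List (List Int)), Dom_mat_to_list L → Pre_mat_to_list L → Spec_mat_to_list L (mat_to_list L)

-- ===== LEMMAS AND PROOFS =====

-- rightmost index < n holding a 1 (0 if none), as a forward fold
def bPos (row : List Int) (n : Nat) : Nat :=
  (List.range n).foldl (fun (pos j : Nat) => if (PySem.List.pyGet? row (j : Int)).getD 0 = 1 then j else pos) 0

theorem bPos_succ (row : List Int) (n : Nat) :
    bPos row (n + 1) = if (PySem.List.pyGet? row (n : Int)).getD 0 = 1 then n else bPos row n := by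
  simp [bPos, List.range_succ]

theorem bPos_le (row : List Int) (n : Nat) : bPos row n ≤ n - 1 := by
  induction n with
  | zero => simp [bPos]
  | succ n ih =>
    rw [bPos_succ]
    split <;> omega

-- A's inner loop computes 2^(8 * distance from the rightmost 1)
theorem matALoop_eq (row : List Int) (j : Nat) (somme : Int) :
    matALoop row j somme = somme * 2 ^ (8 * (j - bPos row (j + 1))) := by
  induction j generalizing somme with
  | zero =>
    rw [matALoop]
    simp
  | succ j ih =>
    rw [matALoop, bPos_succ]
    push_cast
    by_cases h1 : (PySem.List.pyGet? row ((j : Int) + 1)).getD 0 = 1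
    · rw [dif_neg (by simp [h1]), if_pos h1]
      simp
    · have hb : bPos row (j + 1) ≤ j := bPos_le row (j + 1)
      rw [dif_pos ⟨h1, by omega⟩, if_neg h1]
      rw [ih, Int.shiftLeft_eq]
      have hexp : 8 * (j + 1 - bPos row (j + 1)) = 8 + 8 * (j - bPos row (j + 1)) := by omega
      rw [hexp, pow_add]
      ring

theorem foldl_min_comm (l : List Int) (a b : Int) :
    l.foldl min (min a b) = min (l.foldl min a) b := by
  induction l generalizing a with
  | nil => simp
  | cons c t ih =>
    simp only [List.foldl_cons]
    rw [min_right_comm, ih]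

-- Python min over a list with a known last element
theorem min?_append_singleton (l : List Int) (x : Int) :
    PySem.List.min? (l ++ [x]) (fun y => y) = some (l.foldl min x) := by
  cases l with
  | nil => simp [PySem.List.min?]
  | cons h t =>
    rw [List.cons_append, PySem.List.min?_id_cons, List.foldl_append]
    simp only [List.foldl_cons, List.foldl_nil]
    rw [show min x h = min h x from min_comm x h, foldl_min_comm]

-- the min of B's candidates (for a scan bound m ≤ n) is the candidate of the rightmost 1
theorem foldl_min_cands (row : List Int) (n m : Nat) (hm : m ≤ n) :
    (((List.range m).filter (fun (j : Nat) => (PySem.List.pyGet? row (j : Int)).getD 0 == 1)).map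
        (fun (j : Nat) => (2 : Int) ^ (8 * (n - 1 - j)))).foldl min ((2 : Int) ^ (8 * (n - 1))) =
      (2 : Int) ^ (8 * (n - 1 - bPos row m)) := by
  induction m with
  | zero => simp [bPos]
  | succ m ih =>
    rw [List.range_succ, List.filter_append, List.map_append, List.foldl_append, bPos_succ,
      ih (by omega)]
    have hget : (PySem.List.pyGet? row (m : Int)).getD 0 = row[m]?.getD 0 := by
      simp [pysem]
    rw [hget]
    by_cases h1 : row[m]?.getD 0 = 1
    · have hb : bPos row m ≤ m := le_trans (bPos_le row m) (by omega)
      simp only [List.filter_cons, List.filter_nil, hget, h1, beq_self_eq_true, if_true,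
        List.map_cons, List.map_nil, List.foldl_cons, List.foldl_nil]
      exact min_eq_right (pow_le_pow_right₀ (by norm_num) (by omega))
    · simp [h1]

-- B's row expression computes the candidate of the rightmost 1
theorem alt_row (row : List Int) (n : Nat) :
    (PySem.List.min? ((((PySem.List.pyRange 0 (n : Int) 1).filter
         (fun j => (PySem.List.pyGet? row j).getD 0 == 1)).map
        (fun j => (1 : Int) <<< (8 * ((n : Int) - 1 - j)).toNat))
      ++ [(1 : Int) <<< (8 * (n - 1))]) (fun y => y)).getD 0
    = 2 ^ (8 * (n - 1 - bPos row n)) := by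
  rw [PySem.List.pyRange_zero_natCast, List.filter_map, List.map_map]
  rw [List.map_congr_left (f := _)
    (g := fun (j : Nat) => (2 : Int) ^ (8 * (n - 1 - j))) ?_]
  · rw [min?_append_singleton, Option.getD_some,
      show (1 : Int) <<< (8 * (n - 1)) = 2 ^ (8 * (n - 1)) by
        rw [Int.shiftLeft_eq, one_mul]]
    exact foldl_min_cands row n n le_rfl
  · intro j hj
    have hjn : j < n := by
      have := List.mem_range.mp (List.mem_of_mem_filter hj)
      exact this
    simp only [Function.comp_apply]
    rw [Int.shiftLeft_eq, one_mul]
    congr 1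
    omega

theorem foldl_append_map {α β : Type} (f : α → β) (L : List α) (acc : List β) :
    L.foldl (fun l r => l ++ [f r]) acc = acc ++ L.map f := by
  induction L generalizing acc with
  | nil => simp
  | cons x xs ih => simp [ih]

-- ===== VERDICT (by name: the statement is the Claim_ definition above) =====
theorem mat_to_list_spec : Claim_equal_mat_to_list := by
  intro L _ _
  unfold Spec_mat_to_list mat_to_list mat_to_list_alt
  rw [foldl_append_map]
  simp only [List.nil_append]
  refine List.map_congr_left ?_
  intro row hrow
  have hn : 1 ≤ L.length := by
    cases L with
    | nil => simp at hrow
    | cons a l => simp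
  rw [matALoop_eq, alt_row row L.length]
  have h1 : L.length - 1 + 1 = L.length := by omega
  rw [h1, one_mul]
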